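-- pv_equiv track=rewrite | github.com/deussbelli/Serpens | applied_сryptology/methods/bbs.py | calculate_period
-- ===== SOURCE A (Python) =====
-- def calculate_period(n, x0):
--     x = x0
--     seen = set()
--     period = 0
--     while True:
--         x = pow(x, 2, n)
--         if x in seen:
--             break
--         seen.add(x)
--         period += 1
--     return period
-- ===== SOURCE B (Python) =====
-- def calculate_period(n, x0):
--     # Floyd two-pointer cycle detection over f(v) = pow(v, 2, n), starting at s1 = f(x0):
--     # find the meeting point, then the tail length mu and the cycle length lam; answer mu + lam.
--     s1 = pow(x0, 2, n)
--     tort = pow(s1, 2, n)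
--     hare = pow(tort, 2, n)
--     while tort != hare:
--         tort = pow(tort, 2, n)
--         hare = pow(pow(hare, 2, n), 2, n)
--     mu = 0
--     p = s1
--     while p != tort:
--         p = pow(p, 2, n)
--         tort = pow(tort, 2, n)
--         mu += 1
--     lam = 1
--     q = pow(tort, 2, n)
--     while q != tort:
--         q = pow(q, 2, n)
--         lam += 1
--     return mu + lam
-- ===== Notes on version B (the rewrite author's own statement) =====
-- stated objective: alternative
-- what changed: Replaces A's visited-set accumulation with Floyd's two-pointer cycle detection over f(v)=pow(v,2,n) starting at f(x0): it finds the meeting point, then the tail length mu and cycle length lam, and returns mu+lam, which equals A's count of distinct values before the first repeat; B uses O(1) memory instead of a set of size mu+lam.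
-- outside the precondition, e.g. on calculate_period(0, 3): A raises ValueError, B raises ValueError
import Mathlib
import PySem

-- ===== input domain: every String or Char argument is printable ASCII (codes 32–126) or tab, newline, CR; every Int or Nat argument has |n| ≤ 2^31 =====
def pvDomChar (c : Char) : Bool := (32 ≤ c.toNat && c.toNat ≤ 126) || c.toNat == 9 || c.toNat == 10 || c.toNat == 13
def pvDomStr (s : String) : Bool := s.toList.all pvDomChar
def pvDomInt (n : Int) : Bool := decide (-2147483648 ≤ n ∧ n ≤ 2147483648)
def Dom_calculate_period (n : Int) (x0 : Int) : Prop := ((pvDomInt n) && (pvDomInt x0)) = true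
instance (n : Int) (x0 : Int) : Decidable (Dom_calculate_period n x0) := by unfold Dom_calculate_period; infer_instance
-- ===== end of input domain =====

-- B replaces A's visited-set scan by Floyd's two-pointer cycle detection (tail mu + cycle lam), using O(1) memory.


-- ===== PORT A =====
-- A's unbounded 'while True' loop, with fuel n.natAbs + 1 as a totality guard (proved sufficient below).
def pvALoop (n : Int) (fuel : Nat) (x : Int) (seen : PySem.Set Int) (period : Int) : Int :=
  match fuel with
  | 0 => period
  | fuel + 1 =>
    if PySem.Int.powMod x 2 n ∈ seen then period
    else pvALoop n fuel (PySem.Int.powMod x 2 n)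
           (PySem.Set.add seen (PySem.Int.powMod x 2 n)) (period + 1)

def calculate_period (n : Int) (x0 : Int) : Int :=
  pvALoop n (n.natAbs + 1) x0 PySem.Set.empty 0

-- ===== PORT B =====
-- B's three while-loops, each with fuel n.natAbs + 1 as a totality guard (proved sufficient below).
def pvMeet (n : Int) (fuel : Nat) (tort hare : Int) : Int :=
  match fuel with
  | 0 => tort
  | fuel + 1 =>
    if tort = hare then tort
    else pvMeet n fuel (PySem.Int.powMod tort 2 n)
           (PySem.Int.powMod (PySem.Int.powMod hare 2 n) 2 n)

def pvMu (n : Int) (fuel : Nat) (p tort : Int) (mu : Int) : Int × Int :=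
  match fuel with
  | 0 => (mu, tort)
  | fuel + 1 =>
    if p = tort then (mu, tort)
    else pvMu n fuel (PySem.Int.powMod p 2 n) (PySem.Int.powMod tort 2 n) (mu + 1)

def pvLamLoop (n : Int) (fuel : Nat) (q tort : Int) (lam : Int) : Int :=
  match fuel with
  | 0 => lam
  | fuel + 1 =>
    if q = tort then lam
    else pvLamLoop n fuel (PySem.Int.powMod q 2 n) tort (lam + 1)

def calculate_period_alt (n : Int) (x0 : Int) : Int :=
  let s1 := PySem.Int.powMod x0 2 n
  let fuel := n.natAbs + 1
  let t0 := PySem.Int.powMod s1 2 n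
  let meetv := pvMeet n fuel t0 (PySem.Int.powMod t0 2 n)
  let mt := pvMu n fuel s1 meetv 0
  let lam := pvLamLoop n fuel (PySem.Int.powMod mt.2 2 n) mt.2 1
  mt.1 + lam

-- ===== PRECONDITION & SPEC =====
-- Pre_ excludes exactly n = 0, where Python's pow(x, 2, 0) raises ValueError in both A and B.
def Pre_calculate_period (n : Int) (x0 : Int) : Prop := n ≠ 0
instance (n : Int) (x0 : Int) : Decidable (Pre_calculate_period n x0) := by unfold Pre_calculate_period; infer_instance
def pvWitness_calculate_period : Int × Int := (5, 3)

def Spec_calculate_period (n : Int) (x0 : Int) (out : Int) : Prop := out = calculate_period_alt n x0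
instance (n : Int) (x0 : Int) (out : Int) : Decidable (Spec_calculate_period n x0 out) := by unfold Spec_calculate_period; infer_instance

-- ===== CLAIM (what is proved, stated in full; the proofs are below) =====
def Claim_equal_calculate_period : Prop := ∀ (n : Int) (x0 : Int), Dom_calculate_period n x0 → Pre_calculate_period n x0 → Spec_calculate_period n x0 (calculate_period n x0)

-- ===== LEMMAS AND PROOFS =====

-- The orbit of the squaring map starting at s1 = f(x0): pvSeq i = f^[i] (f x0).
def pvSeq (n x0 : Int) (i : Nat) : Int :=
  (fun v => PySem.Int.powMod v 2 n)^[i] (PySem.Int.powMod x0 2 n)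

lemma pvSeq_succ (n x0 : Int) (i : Nat) :
    pvSeq n x0 (i + 1) = PySem.Int.powMod (pvSeq n x0 i) 2 n := by
  simp [pvSeq, Function.iterate_succ_apply']

lemma pvSeq_add (n x0 : Int) (i t : Nat) :
    pvSeq n x0 (i + t) = (fun v => PySem.Int.powMod v 2 n)^[t] (pvSeq n x0 i) := by
  simp [pvSeq, Nat.add_comm i t, Function.iterate_add_apply]

lemma pvSeq_shift (n x0 : Int) {a b : Nat} (h : pvSeq n x0 a = pvSeq n x0 b) (t : Nat) :
    pvSeq n x0 (a + t) = pvSeq n x0 (b + t) := by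
  rw [pvSeq_add, pvSeq_add, h]

-- Residue set of Python's mod n (sign of the divisor).
noncomputable def pvRes (n : Int) : Finset Int := if 0 < n then Finset.Ico 0 n else Finset.Ioc n 0

lemma pvRes_card (n : Int) : (pvRes n).card = n.natAbs := by
  unfold pvRes; split_ifs with h
  · rw [Int.card_Ico]; omega
  · rw [Int.card_Ioc]; omega

lemma pvF_mem (n v : Int) (hn : n ≠ 0) : PySem.Int.powMod v 2 n ∈ pvRes n := by
  unfold pvRes PySem.Int.powMod
  split_ifs with h
  · simp only [Finset.mem_Ico]
    exact ⟨PySem.Int.mod_nonneg _ h, PySem.Int.mod_lt _ h⟩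
  · have h' : n < 0 := by omega
    have := PySem.Int.mod_neg_bounds (a := v ^ 2) h'
    simp only [Finset.mem_Ioc]
    exact this

lemma pvSeq_mem (n x0 : Int) (hn : n ≠ 0) (i : Nat) : pvSeq n x0 i ∈ pvRes n := by
  cases i with
  | zero => exact pvF_mem n x0 hn
  | succ k => rw [pvSeq_succ]; exact pvF_mem n _ hn

lemma pvCollision (n x0 : Int) (hn : n ≠ 0) :
    ∃ i j, i < j ∧ j ≤ n.natAbs ∧ pvSeq n x0 i = pvSeq n x0 j := by
  have hcard : (pvRes n).card < (Finset.range (n.natAbs + 1)).card := by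
    rw [pvRes_card, Finset.card_range]; omega
  have hmap : ∀ k ∈ Finset.range (n.natAbs + 1), pvSeq n x0 k ∈ pvRes n :=
    fun k _ => pvSeq_mem n x0 hn k
  obtain ⟨i, hi, j, hj, hne, heq⟩ :=
    Finset.exists_ne_map_eq_of_card_lt_of_maps_to hcard hmap
  simp only [Finset.mem_range] at hi hj
  rcases Nat.lt_or_ge i j with hlt | hge
  · exact ⟨i, j, hlt, by omega, heq⟩
  · have : j < i := by omega
    exact ⟨j, i, this, by omega, heq.symm⟩

-- F1: eventual periodicity from minimal (mu, lam).
lemma pvF1 (n x0 : Int) (mu lam : Nat)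
    (hper : pvSeq n x0 (mu + lam) = pvSeq n x0 mu) :
    ∀ i, mu ≤ i → pvSeq n x0 (i + lam) = pvSeq n x0 i := by
  intro i hi
  obtain ⟨d, rfl⟩ := Nat.exists_eq_add_of_le hi
  have h := pvSeq_shift n x0 hper d
  have e1 : mu + lam + d = mu + d + lam := by omega
  rw [e1] at h
  exact h

-- F2: periodicity iterated.
lemma pvF2 (n x0 : Int) (mu lam : Nat)
    (hper : pvSeq n x0 (mu + lam) = pvSeq n x0 mu) :
    ∀ i q, mu ≤ i → pvSeq n x0 (i + q * lam) = pvSeq n x0 i := by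
  intro i q hi
  induction q with
  | zero => simp
  | succ k ih =>
    have e : i + (k + 1) * lam = (i + k * lam) + lam := by ring
    rw [e, pvF1 n x0 mu lam hper _ (by omega), ih]

-- local period propagated forward.
lemma pvH2 (n x0 : Int) {a p : Nat}
    (h : ∀ i, a ≤ i → pvSeq n x0 (i + p) = pvSeq n x0 i) :
    ∀ i k, a ≤ i → pvSeq n x0 (i + k * p) = pvSeq n x0 i := by
  intro i k hi
  induction k with
  | zero => simp
  | succ m ih =>
    have e : i + (m + 1) * p = (i + m * p) + p := by ring
    rw [e, h _ (by omega), ih]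

-- F4: any collision lies in the cycle and spans a multiple of lam.
lemma pvCollapse (n x0 : Int) (mu lam : Nat) (hlam : 0 < lam)
    (hper : pvSeq n x0 (mu + lam) = pvSeq n x0 mu)
    (hlam_min : ∀ p, 0 < p → (∃ i, pvSeq n x0 (i + p) = pvSeq n x0 i) → lam ≤ p)
    (hmu_min : ∀ i, pvSeq n x0 (i + lam) = pvSeq n x0 i → mu ≤ i) :
    ∀ a b, a < b → pvSeq n x0 a = pvSeq n x0 b → mu ≤ a ∧ lam ∣ (b - a) := by
  intro a b hab heq
  set p := b - a with hp
  have hppos : 0 < p := by omega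
  have H : ∀ i, a ≤ i → pvSeq n x0 (i + p) = pvSeq n x0 i := by
    intro i hi
    obtain ⟨t, rfl⟩ := Nat.exists_eq_add_of_le hi
    have h := (pvSeq_shift n x0 heq t).symm
    have e1 : b + t = a + t + p := by omega
    rw [e1] at h
    exact h
  have hdvd : lam ∣ p := by
    rcases Nat.eq_zero_or_pos (p % lam) with hr | hr
    · exact Nat.dvd_of_mod_eq_zero hr
    · exfalso
      set i := max a mu with hi
      have h1 : pvSeq n x0 (i + p) = pvSeq n x0 i := H i (le_max_left _ _)
      have e : i + p = (i + p % lam) + (p / lam) * lam := by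
        have h1 := Nat.div_add_mod p lam
        have h2 : lam * (p / lam) = (p / lam) * lam := Nat.mul_comm _ _
        omega
      rw [e, pvF2 n x0 mu lam hper _ _ (by omega)] at h1
      have := hlam_min (p % lam) hr ⟨i, h1⟩
      have := Nat.mod_lt p hlam
      omega
  refine ⟨?_, hdvd⟩
  obtain ⟨q, hq⟩ := hdvd
  have hq1 : 1 ≤ q := by
    rcases Nat.eq_zero_or_pos q with h0 | h
    · subst h0; simp at hq; omega
    · exact h
  have key : pvSeq n x0 (a + lam) = pvSeq n x0 a := by
    have h1 : pvSeq n x0 (a + lam) = pvSeq n x0 ((a + lam) + mu * p) :=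
      (pvH2 n x0 H (a + lam) mu (by omega)).symm
    have h2 : pvSeq n x0 ((a + mu * p) + lam) = pvSeq n x0 (a + mu * p) := by
      apply pvF1 n x0 mu lam hper
      have : mu ≤ mu * p := Nat.le_mul_of_pos_right mu hppos
      omega
    have h3 : pvSeq n x0 (a + mu * p) = pvSeq n x0 a := pvH2 n x0 H a mu (le_refl a)
    have e : a + lam + mu * p = (a + mu * p) + lam := by ring
    rw [h1, e, h2, h3]
  exact hmu_min a key

-- F5: converse — cycle indices with period a multiple of lam.
lemma pvF5 (n x0 : Int) (mu lam : Nat)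
    (hper : pvSeq n x0 (mu + lam) = pvSeq n x0 mu) :
    ∀ a p, mu ≤ a → lam ∣ p → pvSeq n x0 (a + p) = pvSeq n x0 a := by
  intro a p ha hd
  obtain ⟨q, rfl⟩ := hd
  have e : lam * q = q * lam := by ring
  rw [e]
  exact pvF2 n x0 mu lam hper a q ha

-- Loop lemma for A: pvALoop returns the first-repeat index T.
lemma pvALoop_spec (n x0 : Int) (T : Nat)
    (hT : ∃ j, j < T ∧ pvSeq n x0 j = pvSeq n x0 T)
    (hmin : ∀ t, t < T → ¬ ∃ j, j < t ∧ pvSeq n x0 j = pvSeq n x0 t) :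
    ∀ (fuel t : Nat) (x : Int) (seen : PySem.Set Int),
      t ≤ T → T - t < fuel →
      PySem.Int.powMod x 2 n = pvSeq n x0 t →
      (∀ v, v ∈ seen ↔ ∃ j, j < t ∧ pvSeq n x0 j = v) →
      pvALoop n fuel x seen (t : Int) = (T : Int) := by
  intro fuel
  induction fuel with
  | zero => intro t x seen ht hf hx hseen; omega
  | succ fuel ih =>
    intro t x seen ht hf hx hseen
    simp only [pvALoop]
    rw [hx]
    by_cases hmem : pvSeq n x0 t ∈ seen
    · have hPt := (hseen _).1 hmem
      have htT : t = T := by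
        by_contra hne
        exact hmin t (by omega) hPt
      rw [if_pos hmem, htT]
    · have htT : t < T := by
        rcases Nat.lt_or_ge t T with h | h
        · exact h
        · exfalso
          have he : t = T := by omega
          subst he
          obtain ⟨j, hj, hje⟩ := hT
          exact hmem ((hseen _).2 ⟨j, hj, hje⟩)
      rw [if_neg hmem]
      have hcast : (t : Int) + 1 = ((t + 1 : Nat) : Int) := by push_cast; ring
      rw [hcast]
      apply ih (t + 1) (pvSeq n x0 t) _ (by omega) (by omega)
      · exact (pvSeq_succ n x0 t).symm
      · intro v
        rw [PySem.Set.mem_add]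
        constructor
        · rintro (hv | rfl)
          · obtain ⟨j, hj, hje⟩ := (hseen v).1 hv
            exact ⟨j, by omega, hje⟩
          · exact ⟨t, by omega, rfl⟩
        · rintro ⟨j, hj, hje⟩
          rcases Nat.lt_or_ge j t with h | h
          · exact Or.inl ((hseen v).2 ⟨j, h, hje⟩)
          · have : j = t := by omega
            subst this
            exact Or.inr hje.symm

-- Loop lemma for B phase 1.
lemma pvMeet_spec (n x0 : Int) (M : Nat) (hM : 1 ≤ M)
    (hQ : pvSeq n x0 M = pvSeq n x0 (2 * M))
    (hmin : ∀ m, 1 ≤ m → m < M → pvSeq n x0 m ≠ pvSeq n x0 (2 * m)) :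
    ∀ (fuel m : Nat), 1 ≤ m → m ≤ M → M - m < fuel →
      pvMeet n fuel (pvSeq n x0 m) (pvSeq n x0 (2 * m)) = pvSeq n x0 M := by
  intro fuel
  induction fuel with
  | zero => intro m h1 h2 hf; omega
  | succ fuel ih =>
    intro m h1 h2 hf
    simp only [pvMeet]
    by_cases he : pvSeq n x0 m = pvSeq n x0 (2 * m)
    · rw [if_pos he]
      have hm : m = M := by
        by_contra hne
        exact hmin m h1 (by omega) he
      rw [hm]
    · rw [if_neg he]
      have hmM : m < M := by
        rcases Nat.lt_or_ge m M with h | h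
        · exact h
        · exfalso
          have hm : m = M := by omega
          subst hm
          exact he hQ
      have e1 : PySem.Int.powMod (pvSeq n x0 m) 2 n = pvSeq n x0 (m + 1) :=
        (pvSeq_succ n x0 m).symm
      have e2 : PySem.Int.powMod (PySem.Int.powMod (pvSeq n x0 (2 * m)) 2 n) 2 n
          = pvSeq n x0 (2 * (m + 1)) := by
        have e : 2 * (m + 1) = (2 * m + 1) + 1 := by ring
        rw [e, pvSeq_succ, pvSeq_succ]
      rw [e1, e2]
      exact ih (m + 1) (by omega) (by omega) (by omega)

-- Loop lemma for B phase 2.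
lemma pvMu_spec (n x0 : Int) (m mu : Nat)
    (hstop : pvSeq n x0 mu = pvSeq n x0 (mu + m))
    (hmin : ∀ j, j < mu → pvSeq n x0 j ≠ pvSeq n x0 (j + m)) :
    ∀ (fuel j : Nat), j ≤ mu → mu - j < fuel →
      pvMu n fuel (pvSeq n x0 j) (pvSeq n x0 (j + m)) (j : Int) =
        ((mu : Int), pvSeq n x0 (mu + m)) := by
  intro fuel
  induction fuel with
  | zero => intro j hj hf; omega
  | succ fuel ih =>
    intro j hj hf
    simp only [pvMu]
    by_cases he : pvSeq n x0 j = pvSeq n x0 (j + m)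
    · rw [if_pos he]
      have hjm : j = mu := by
        by_contra hne
        exact hmin j (by omega) he
      subst hjm
      rfl
    · rw [if_neg he]
      have hjmu : j < mu := by
        rcases Nat.lt_or_ge j mu with h | h
        · exact h
        · exfalso
          have hj' : j = mu := by omega
          subst hj'
          exact he hstop
      have e1 : PySem.Int.powMod (pvSeq n x0 j) 2 n = pvSeq n x0 (j + 1) :=
        (pvSeq_succ n x0 j).symm
      have e2 : PySem.Int.powMod (pvSeq n x0 (j + m)) 2 n = pvSeq n x0 ((j + 1) + m) := by
        have e : (j + 1) + m = (j + m) + 1 := by ring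
        rw [e, pvSeq_succ]
      have hcast : (j : Int) + 1 = ((j + 1 : Nat) : Int) := by push_cast; ring
      rw [e1, e2, hcast]
      exact ih (j + 1) (by omega) (by omega)

-- Loop lemma for B phase 3.
lemma pvLamLoop_spec (n x0 : Int) (c L : Nat) (hL : 1 ≤ L)
    (hstop : pvSeq n x0 (c + L) = pvSeq n x0 c)
    (hmin : ∀ l, 1 ≤ l → l < L → pvSeq n x0 (c + l) ≠ pvSeq n x0 c) :
    ∀ (fuel l : Nat), 1 ≤ l → l ≤ L → L - l < fuel →
      pvLamLoop n fuel (pvSeq n x0 (c + l)) (pvSeq n x0 c) (l : Int) = (L : Int) := by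
  intro fuel
  induction fuel with
  | zero => intro l h1 h2 hf; omega
  | succ fuel ih =>
    intro l h1 h2 hf
    simp only [pvLamLoop]
    by_cases he : pvSeq n x0 (c + l) = pvSeq n x0 c
    · rw [if_pos he]
      have hl : l = L := by
        by_contra hne
        exact hmin l h1 (by omega) he
      rw [hl]
    · rw [if_neg he]
      have hlL : l < L := by
        rcases Nat.lt_or_ge l L with h | h
        · exact h
        · exfalso
          have hl : l = L := by omega
          subst hl
          exact he hstop
      have e1 : PySem.Int.powMod (pvSeq n x0 (c + l)) 2 n = pvSeq n x0 (c + (l + 1)) := by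
        have e : c + (l + 1) = (c + l) + 1 := by ring
        rw [e, pvSeq_succ]
      have hcast : (l : Int) + 1 = ((l + 1 : Nat) : Int) := by push_cast; ring
      rw [e1, hcast]
      exact ih (l + 1) (by omega) (by omega) (by omega)

theorem pvMain (n x0 : Int) (hn : n ≠ 0) :
    calculate_period n x0 = calculate_period_alt n x0 := by
  classical
  obtain ⟨i0, j0, hij, hj0N, hcol⟩ := pvCollision n x0 hn
  have hex : ∃ p, 0 < p ∧ ∃ i, pvSeq n x0 (i + p) = pvSeq n x0 i := by
    refine ⟨j0 - i0, by omega, i0, ?_⟩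
    have e : i0 + (j0 - i0) = j0 := by omega
    rw [e]
    exact hcol.symm
  set lam := Nat.find hex with hlamdef
  have hlamspec := Nat.find_spec hex
  have hlam_pos : 0 < lam := hlamspec.1
  have hlam_min : ∀ p, 0 < p → (∃ i, pvSeq n x0 (i + p) = pvSeq n x0 i) → lam ≤ p :=
    fun p hp hep => Nat.find_min' hex ⟨hp, hep⟩
  have hex2 : ∃ i, pvSeq n x0 (i + lam) = pvSeq n x0 i := hlamspec.2
  set mu := Nat.find hex2 with hmudef
  have hper : pvSeq n x0 (mu + lam) = pvSeq n x0 mu := Nat.find_spec hex2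
  have hmu_min : ∀ i, pvSeq n x0 (i + lam) = pvSeq n x0 i → mu ≤ i :=
    fun i h => Nat.find_min' hex2 h
  have hF4 := pvCollapse n x0 mu lam hlam_pos hper hlam_min hmu_min
  have hF5 := pvF5 n x0 mu lam hper
  -- bound mu + lam ≤ |n|
  have hTN : mu + lam ≤ n.natAbs := by
    obtain ⟨hmu0, hdvd⟩ := hF4 i0 j0 hij hcol
    have := Nat.le_of_dvd (by omega) hdvd
    omega
  -- A side
  have hminT : ∀ t, t < mu + lam → ¬ ∃ j, j < t ∧ pvSeq n x0 j = pvSeq n x0 t := by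
    rintro t ht ⟨j, hjt, he⟩
    obtain ⟨h1, h2⟩ := hF4 j t hjt he
    have := Nat.le_of_dvd (by omega) h2
    omega
  have hA : calculate_period n x0 = (mu : Int) + (lam : Int) := by
    have h := pvALoop_spec n x0 (mu + lam) ⟨mu, by omega, hper.symm⟩ hminT
      (n.natAbs + 1) 0 x0 PySem.Set.empty (by omega) (by omega) rfl
      (by intro v; simp [PySem.Set.empty])
    unfold calculate_period
    simpa using h
  -- B side: meeting point
  have hexM : ∃ m, 0 < m ∧ pvSeq n x0 m = pvSeq n x0 (2 * m) := by
    refine ⟨lam * (mu + 1), Nat.mul_pos hlam_pos (by omega), ?_⟩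
    have hmule : mu ≤ lam * (mu + 1) := by
      have h := Nat.le_mul_of_pos_left (mu + 1) hlam_pos
      omega
    have e : 2 * (lam * (mu + 1)) = lam * (mu + 1) + lam * (mu + 1) := by ring
    rw [e]
    exact (hF5 _ _ hmule ⟨mu + 1, rfl⟩).symm
  set M := Nat.find hexM with hMdef
  have hMspec := Nat.find_spec hexM
  have hMpos : 0 < M := hMspec.1
  have hMQ : pvSeq n x0 M = pvSeq n x0 (2 * M) := hMspec.2
  have hMminP : ∀ m, 1 ≤ m → m < M → pvSeq n x0 m ≠ pvSeq n x0 (2 * m) := by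
    intro m h1 h2 he
    exact Nat.find_min hexM h2 ⟨by omega, he⟩
  obtain ⟨hMmu, hMdvd⟩ : mu ≤ M ∧ lam ∣ M := by
    have h := hF4 M (2 * M) (by omega) hMQ
    have e : 2 * M - M = M := by omega
    rw [e] at h
    exact h
  have hMle : M ≤ mu + lam := by
    have hdm := Nat.div_add_mod mu lam
    have hml : mu % lam < lam := Nat.mod_lt _ hlam_pos
    have hcomm : lam * (mu / lam) = (mu / lam) * lam := Nat.mul_comm _ _
    have hmuc : mu ≤ lam * (mu / lam + 1) := by
      have e : lam * (mu / lam + 1) = lam * (mu / lam) + lam := by ring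
      omega
    have hc : 0 < lam * (mu / lam + 1) ∧
        pvSeq n x0 (lam * (mu / lam + 1)) = pvSeq n x0 (2 * (lam * (mu / lam + 1))) := by
      refine ⟨Nat.mul_pos hlam_pos (Nat.succ_pos _), ?_⟩
      have e : 2 * (lam * (mu / lam + 1)) = lam * (mu / lam + 1) + lam * (mu / lam + 1) := by
        ring
      rw [e]
      exact (hF5 _ _ hmuc ⟨mu / lam + 1, rfl⟩).symm
    have h1 : M ≤ lam * (mu / lam + 1) := Nat.find_min' hexM hc
    have h2 : lam * (mu / lam + 1) ≤ mu + lam := by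
      have e : lam * (mu / lam + 1) = lam * (mu / lam) + lam := by ring
      omega
    omega
  -- phase 2 facts
  have hstop2 : pvSeq n x0 mu = pvSeq n x0 (mu + M) := (hF5 mu M (le_refl mu) hMdvd).symm
  have hmin2 : ∀ j, j < mu → pvSeq n x0 j ≠ pvSeq n x0 (j + M) := by
    intro j hj he
    have h := (hF4 j (j + M) (by omega) he).1
    omega
  -- phase 3 facts
  have hstop3 : pvSeq n x0 ((mu + M) + lam) = pvSeq n x0 (mu + M) :=
    pvF1 n x0 mu lam hper _ (by omega)
  have hmin3 : ∀ l, 1 ≤ l → l < lam → pvSeq n x0 ((mu + M) + l) ≠ pvSeq n x0 (mu + M) := by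
    intro l h1 h2 he
    have hd := (hF4 (mu + M) (mu + M + l) (by omega) he.symm).2
    have e : mu + M + l - (mu + M) = l := by omega
    rw [e] at hd
    have := Nat.le_of_dvd (by omega) hd
    omega
  -- assemble B
  have hmeet : pvMeet n (n.natAbs + 1) (pvSeq n x0 1) (pvSeq n x0 2) = pvSeq n x0 M := by
    have h := pvMeet_spec n x0 M (by omega) hMQ hMminP (n.natAbs + 1) 1
      (le_refl 1) (by omega) (by omega)
    simpa using h
  have hmu' : pvMu n (n.natAbs + 1) (pvSeq n x0 0) (pvSeq n x0 M) (0 : Int) =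
      ((mu : Int), pvSeq n x0 (mu + M)) := by
    have h := pvMu_spec n x0 M mu hstop2 hmin2 (n.natAbs + 1) 0 (by omega) (by omega)
    simpa using h
  have hlam' : pvLamLoop n (n.natAbs + 1) (pvSeq n x0 ((mu + M) + 1))
      (pvSeq n x0 (mu + M)) (1 : Int) = (lam : Int) := by
    have h := pvLamLoop_spec n x0 (mu + M) lam (by omega) hstop3 hmin3
      (n.natAbs + 1) 1 (le_refl 1) (by omega) (by omega)
    simpa using h
  have hB : calculate_period_alt n x0 = (mu : Int) + (lam : Int) := by
    have e0 : PySem.Int.powMod x0 2 n = pvSeq n x0 0 := rfl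
    have e1 : PySem.Int.powMod (pvSeq n x0 0) 2 n = pvSeq n x0 1 := (pvSeq_succ n x0 0).symm
    have e2 : PySem.Int.powMod (pvSeq n x0 1) 2 n = pvSeq n x0 2 := (pvSeq_succ n x0 1).symm
    have e3 : PySem.Int.powMod (pvSeq n x0 (mu + M)) 2 n = pvSeq n x0 ((mu + M) + 1) :=
      (pvSeq_succ n x0 (mu + M)).symm
    simp only [calculate_period_alt]
    rw [e0, e1, e2, hmeet, hmu']
    simp only []
    rw [e3, hlam']
  rw [hA, hB]

-- ===== VERDICT (by name: the statement is the Claim_ definition above) =====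
theorem calculate_period_spec : Claim_equal_calculate_period := by
  intro n x0 _ hpre
  unfold Spec_calculate_period
  exact pvMain n x0 hpre
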